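-- pv_equiv track=rewrite | github.com/Jesse-L2/Algorithms_DataStructures_Practice | Algorithms/Search/BinarySearch.py | binary_range_search
-- ===== SOURCE A (Python) =====
-- def binary_range_search(low, high):
--     while low <= high:
--         mid = low + (high - low) // 2
--
--         if is_correct(mid) > 0:
--             high = mid - 1
--         elif is_correct(mid) < 0:
--             low = mid + 1
--         else:
--             return mid
--
--     return -1
--
-- max_value = 100
--
-- def is_correct(n):
--     # Returns 1 if n too big, -1 too small, 0 if correct
--     if n > max_value:
--         return 1
--     elif n < max_value:
--         return -1
--     else:
--         return 0
-- ===== SOURCE B (Python) =====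
-- max_value = 100
--
-- def binary_range_search(low, high):
--     # The oracle compares mid with the fixed max_value, so the search
--     # succeeds exactly when max_value lies in [low, high]: closed form.
--     return max_value if low <= max_value <= high else -1
-- ===== Notes on version B (the rewrite author's own statement) =====
-- stated objective: simpler
-- what changed: Replaces the oracle-driven binary-search loop with a one-line closed-form range test: the oracle compares against the fixed max_value, so the search returns max_value iff low <= max_value <= high, else -1.
import Mathlib
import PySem

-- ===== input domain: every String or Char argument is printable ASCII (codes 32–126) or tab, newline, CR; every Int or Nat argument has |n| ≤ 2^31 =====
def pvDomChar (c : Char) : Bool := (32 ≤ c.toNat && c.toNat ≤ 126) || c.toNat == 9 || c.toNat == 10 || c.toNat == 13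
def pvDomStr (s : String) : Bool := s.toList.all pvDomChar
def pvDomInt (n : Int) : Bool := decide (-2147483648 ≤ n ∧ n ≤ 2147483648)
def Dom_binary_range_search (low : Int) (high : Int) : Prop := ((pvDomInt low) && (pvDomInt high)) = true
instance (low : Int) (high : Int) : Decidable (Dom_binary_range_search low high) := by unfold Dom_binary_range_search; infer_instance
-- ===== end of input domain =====

-- B replaces the oracle-driven binary-search loop by a one-line closed-form range test
-- (the oracle compares mid with the fixed max_value), for simplicity.

-- ===== PORT A =====
def max_value : Int := 100

def is_correct (n : Int) : Int :=
  if n > max_value then 1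
  else if n < max_value then -1
  else 0

def binary_range_search (low : Int) (high : Int) : Int :=
  if _h : low ≤ high then
    let mid := low + PySem.Int.floordiv (high - low) 2
    if is_correct mid > 0 then binary_range_search low (mid - 1)
    else if is_correct mid < 0 then binary_range_search (mid + 1) high
    else mid
  else -1
termination_by (high - low + 1).toNat
decreasing_by
  all_goals
    have h2 : PySem.Int.floordiv (high - low) 2 = (high - low) / 2 :=
      PySem.Int.floordiv_eq_ediv_of_pos (by omega)
    simp only [h2]
    omega

-- ===== PORT B =====
def binary_range_search_alt (low : Int) (high : Int) : Int :=
  if low ≤ max_value ∧ max_value ≤ high then max_value else -1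

-- ===== PRECONDITION & SPEC =====
def Spec_binary_range_search (low : Int) (high : Int) (out : Int) : Prop := out = binary_range_search_alt low high
instance (low : Int) (high : Int) (out : Int) : Decidable (Spec_binary_range_search low high out) := by unfold Spec_binary_range_search; infer_instance

-- ===== CLAIM (what is proved, stated in full; the proofs are below) =====
def Claim_equal_binary_range_search : Prop := ∀ (low : Int) (high : Int), Dom_binary_range_search low high → Spec_binary_range_search low high (binary_range_search low high)

-- ===== LEMMAS AND PROOFS =====

theorem binary_range_search_eq_alt (low high : Int) :
    binary_range_search low high = binary_range_search_alt low high := by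
  fun_induction binary_range_search low high with
  | case1 low high h mid hgt ih =>
    -- mid > 100, recurse on (low, mid-1)
    have h2 : PySem.Int.floordiv (high - low) 2 = (high - low) / 2 :=
      PySem.Int.floordiv_eq_ediv_of_pos (by omega)
    have hmid : low ≤ mid ∧ mid ≤ high := by
      simp only [mid, h2]; omega
    have hgt' : mid > 100 := by
      simp only [is_correct, max_value] at hgt
      split_ifs at hgt <;> omega
    rw [ih]
    simp only [binary_range_search_alt, max_value]
    split_ifs with h1 h2' h2' <;> omega
  | case2 low high h mid hgt hlt ih =>
    have h2 : PySem.Int.floordiv (high - low) 2 = (high - low) / 2 :=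
      PySem.Int.floordiv_eq_ediv_of_pos (by omega)
    have hmid : low ≤ mid ∧ mid ≤ high := by
      simp only [mid, h2]; omega
    have hlt' : mid < 100 := by
      simp only [is_correct, max_value] at hlt
      split_ifs at hlt <;> omega
    rw [ih]
    simp only [binary_range_search_alt, max_value]
    split_ifs with h1 h2' h2' <;> omega
  | case3 low high h mid hgt hlt =>
    have heq : mid = 100 := by
      simp only [is_correct, max_value] at hgt hlt
      split_ifs at hgt hlt <;> omega
    have h2 : PySem.Int.floordiv (high - low) 2 = (high - low) / 2 :=
      PySem.Int.floordiv_eq_ediv_of_pos (by omega)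
    have hmid : low ≤ mid ∧ mid ≤ high := by
      simp only [mid, h2]; omega
    simp only [binary_range_search_alt, max_value]
    rw [if_pos (by omega)]
    omega
  | case4 low high h =>
    simp only [binary_range_search_alt, max_value]
    rw [if_neg (by omega)]

-- ===== VERDICT (by name: the statement is the Claim_ definition above) =====
theorem binary_range_search_spec : Claim_equal_binary_range_search := by
  intro low high _
  exact binary_range_search_eq_alt low high
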